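-- pv_equiv track=rewrite | github.com/Awehbelekker/universal-mass-framework | Downloads/ai_development_mass_framework-20250622T063827Z-1-001/ai_development_mass_framework/ai_intelligence/ai_personalization_engine.py | _extract_action_sequences
-- ===== SOURCE A (Python) =====
-- from typing import Dict, List, Optional, Any, Tuple
--
-- def _extract_action_sequences(actions: List[Dict[str, Any]]) -> List[List[str]]:
--     """Extract common sequences of actions"""
--
--     sequences = []
--     action_types = [a.get('type', '') for a in actions]
--
--     # Find sequences of 3-5 actions
--     for i in range(len(action_types) - 2):
--         sequence = action_types[i:i+3]
--         if len(set(sequence)) > 1:  # Avoid repetitive sequences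
--             sequences.append(sequence)
--
--     # Return most common sequences (simplified for demo)
--     return sequences[-5:] if sequences else []
-- ===== SOURCE B (Python) =====
-- def _extract_action_sequences(actions):
--     """Extract common sequences of actions"""
--     types = [a.get('type', '') for a in actions]
--     out = []
--     i = len(types) - 3
--     while i >= 0 and len(out) < 5:
--         a, b, c = types[i], types[i + 1], types[i + 2]
--         if not (a == b and b == c):
--             out.append([a, b, c])
--         i -= 1
--     out.reverse()
--     return out
-- ===== Notes on version B (the rewrite author's own statement) =====
-- stated objective: alternative
-- what changed: Instead of building every qualifying 3-window forward and slicing the last 5, B walks the window start index backward from the end, collects qualifying windows until it has 5, breaks early, and reverses the collected list.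
import Mathlib
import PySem

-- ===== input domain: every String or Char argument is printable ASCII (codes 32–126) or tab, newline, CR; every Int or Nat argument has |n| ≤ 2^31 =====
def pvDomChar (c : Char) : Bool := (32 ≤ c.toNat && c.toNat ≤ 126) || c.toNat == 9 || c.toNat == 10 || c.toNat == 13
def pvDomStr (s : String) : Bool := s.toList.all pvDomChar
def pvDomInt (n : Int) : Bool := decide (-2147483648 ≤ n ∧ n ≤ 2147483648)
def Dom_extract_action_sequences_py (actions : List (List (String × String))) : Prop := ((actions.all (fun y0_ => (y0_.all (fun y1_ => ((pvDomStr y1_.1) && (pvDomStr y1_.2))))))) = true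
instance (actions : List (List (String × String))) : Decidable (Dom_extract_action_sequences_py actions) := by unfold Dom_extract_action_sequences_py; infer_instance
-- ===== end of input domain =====

-- B scans the 3-action windows backward from the end and stops as soon as 5 qualifying
-- windows are collected (then reverses), instead of A's full forward pass plus a [-5:] slice.

-- ===== PORT A =====
def extract_action_sequences_py (actions : List (List (String × String))) : List (List String) :=
  let action_types := actions.map (fun a => PySem.Dict.getD (PySem.Dict.mk a) "type" "")
  let sequences := (PySem.List.pyRange 0 ((action_types.length : Int) - 2) 1).foldl
    (fun seqs i =>
      let sequence := PySem.List.slice action_types (some i) (some (i + 3))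
      if 1 < (PySem.Set.ofList sequence).length then seqs ++ [sequence] else seqs) []
  if sequences.length ≠ 0 then PySem.List.slice sequences (some (-5)) none else []

-- ===== PORT B =====
-- backward while-loop of Source B: index i counts down from len-3 to 0, breaking at 5 collected
def pvAltGo (types : List String) : Nat → List (List String) → List (List String)
  | 0, out =>
    if 5 ≤ out.length then out
    else
      let a := types.getD 0 ""
      let b := types.getD (0+1) ""
      let c := types.getD (0+2) ""
      if a = b ∧ b = c then out else out ++ [[a, b, c]]
  | j+1, out =>
    if 5 ≤ out.length then out
    else
      let a := types.getD (j+1) ""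
      let b := types.getD (j+1+1) ""
      let c := types.getD (j+1+2) ""
      pvAltGo types j (if a = b ∧ b = c then out else out ++ [[a, b, c]])

def extract_action_sequences_py_alt (actions : List (List (String × String))) : List (List String) :=
  let types := actions.map (fun a => PySem.Dict.getD (PySem.Dict.mk a) "type" "")
  if types.length < 3 then []
  else (pvAltGo types (types.length - 3) []).reverse

-- ===== PRECONDITION & SPEC =====
def Spec_extract_action_sequences_py (actions : List (List (String × String))) (out : List (List String)) : Prop := out = extract_action_sequences_py_alt actions
instance (actions : List (List (String × String))) (out : List (List String)) : Decidable (Spec_extract_action_sequences_py actions out) := by unfold Spec_extract_action_sequences_py; infer_instance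

-- ===== CLAIM (what is proved, stated in full; the proofs are below) =====
def Claim_equal_extract_action_sequences_py : Prop := ∀ (actions : List (List (String × String))), Dom_extract_action_sequences_py actions → Spec_extract_action_sequences_py actions (extract_action_sequences_py actions)

-- ===== LEMMAS AND PROOFS =====

-- the qualifying window (if any) at index k
def pvG (types : List String) (k : Nat) : Option (List String) :=
  if types.getD k "" = types.getD (k+1) "" ∧ types.getD (k+1) "" = types.getD (k+2) "" then none
  else some [types.getD k "", types.getD (k+1) "", types.getD (k+2) ""]

-- all qualifying windows, left to right
def pvW (types : List String) : List (List String) :=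
  (List.range (types.length - 2)).filterMap (pvG types)

-- descending index list i, i-1, …, 0
def pvDesc : Nat → List Nat
  | 0 => [0]
  | j+1 => (j+1) :: pvDesc j

lemma pvDesc_eq (i : Nat) : pvDesc i = (List.range (i+1)).reverse := by
  induction i with
  | zero => rfl
  | succ j ih => rw [pvDesc, List.range_succ, List.reverse_append, ih]; rfl

lemma pvSet3 (a b c : String) :
    (1 < (PySem.Set.ofList [a, b, c]).length) ↔ ¬(a = b ∧ b = c) := by
  rw [PySem.Set.ofList_eq_foldl]
  simp only [List.foldl, PySem.Set.add, PySem.Set.contains]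
  split_ifs <;> simp_all <;> aesop

lemma pvSlice3 (l : List String) (k : Nat) (h : k + 2 < l.length) :
    PySem.List.slice l (some (k : Int)) (some ((k : Int) + 3)) =
      [l.getD k "", l.getD (k+1) "", l.getD (k+2) ""] := by
  have h0 : k < l.length := by omega
  have h1 : k + 1 < l.length := by omega
  have hdrop : List.drop k l = l[k] :: l[k+1] :: l[k+2] :: List.drop (k+3) l := by
    rw [List.drop_eq_getElem_cons h0, List.drop_eq_getElem_cons h1,
        List.drop_eq_getElem_cons h]
  rw [show ((k : Int) + 3) = ((k : Int) + ((3 : Nat) : Int)) by norm_num,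
      PySem.List.slice_natCast_add, hdrop,
      List.getD_eq_getElem l "" h0, List.getD_eq_getElem l "" h1,
      List.getD_eq_getElem l "" h]
  rfl

lemma pvFoldFilter (C : Nat → Prop) [DecidablePred C] (w : Nat → List String) :
    ∀ (l : List Nat) (init : List (List String)),
      l.foldl (fun seqs k => if C k then seqs ++ [w k] else seqs) init =
        init ++ l.filterMap (fun k => if C k then some (w k) else none) := by
  intro l
  induction l with
  | nil => simp
  | cons x xs ih =>
      intro init
      by_cases hx : C x <;> simp [hx, ih, List.append_assoc]

-- A computes the last ≤5 qualifying windows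
lemma pvA_shape (actions : List (List (String × String))) :
    extract_action_sequences_py actions =
      (pvW (actions.map (fun a => PySem.Dict.getD (PySem.Dict.mk a) "type" ""))).drop
        ((pvW (actions.map (fun a => PySem.Dict.getD (PySem.Dict.mk a) "type" ""))).length - 5) := by
  set types := actions.map (fun a => PySem.Dict.getD (PySem.Dict.mk a) "type" "") with htypes
  show (let sequences := (PySem.List.pyRange 0 ((types.length : Int) - 2) 1).foldl
          (fun seqs i =>
            let sequence := PySem.List.slice types (some i) (some (i + 3))
            if 1 < (PySem.Set.ofList sequence).length then seqs ++ [sequence] else seqs) []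
        if sequences.length ≠ 0 then PySem.List.slice sequences (some (-5)) none else []) =
      (pvW types).drop ((pvW types).length - 5)
  have hrange : PySem.List.pyRange 0 ((types.length : Int) - 2) 1 =
      (List.range (types.length - 2)).map (fun k => ((k : Nat) : Int)) := by
    rw [PySem.List.pyRange_one]
    have : ((types.length : Int) - 2 - 0).toNat = types.length - 2 := by omega
    rw [this]
    simp
  have hfold : (PySem.List.pyRange 0 ((types.length : Int) - 2) 1).foldl
      (fun seqs i =>
        let sequence := PySem.List.slice types (some i) (some (i + 3))
        if 1 < (PySem.Set.ofList sequence).length then seqs ++ [sequence] else seqs) [] =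
      pvW types := by
    rw [hrange, List.foldl_map]
    rw [pvFoldFilter (fun k => 1 < (PySem.Set.ofList (PySem.List.slice types (some (k : Int)) (some ((k : Int) + 3)))).length)
        (fun k => PySem.List.slice types (some (k : Int)) (some ((k : Int) + 3)))]
    rw [List.nil_append, pvW]
    apply List.filterMap_congr
    intro k hk
    have hk2 : k + 2 < types.length := by
      have := List.mem_range.mp hk; omega
    rw [pvSlice3 types k hk2]
    unfold pvG
    by_cases hcc : (types.getD k "" = types.getD (k+1) "" ∧ types.getD (k+1) "" = types.getD (k+2) "")
    · rw [if_neg (fun h => (pvSet3 _ _ _).mp h hcc), if_pos hcc]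
    · rw [if_pos ((pvSet3 _ _ _).mpr hcc), if_neg hcc]
  rw [hfold]
  by_cases hW : (pvW types).length = 0
  · simp [List.eq_nil_of_length_eq_zero hW]
  · rw [if_pos hW]
    rw [PySem.List.slice_from_neg_ofNat _ 5 (by omega)]

lemma pvAltGo_spec (types : List String) :
    ∀ (i : Nat) (out : List (List String)), out.length ≤ 5 →
      pvAltGo types i out =
        out ++ ((pvDesc i).filterMap (pvG types)).take (5 - out.length) := by
  intro i
  induction i with
  | zero =>
      intro out hout
      by_cases h5 : 5 ≤ out.length
      · simp only [pvAltGo]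
        rw [if_pos h5, show 5 - out.length = 0 from by omega, List.take_zero, List.append_nil]
      · simp only [pvAltGo]
        rw [if_neg h5]
        by_cases hc : types.getD 0 "" = types.getD (0+1) "" ∧ types.getD (0+1) "" = types.getD (0+2) ""
        · rw [if_pos hc]
          have hg : pvG types 0 = none := by unfold pvG; rw [if_pos hc]
          have hfm : List.filterMap (pvG types) (pvDesc 0) = [] := by
            rw [show pvDesc 0 = [0] from rfl]; simp [hg]
          rw [hfm, List.take_nil, List.append_nil]
        · rw [if_neg hc]
          have hg : pvG types 0 = some [types.getD 0 "", types.getD (0+1) "", types.getD (0+2) ""] := by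
            unfold pvG; rw [if_neg hc]
          have hfm : List.filterMap (pvG types) (pvDesc 0) =
              [[types.getD 0 "", types.getD (0+1) "", types.getD (0+2) ""]] := by
            rw [show pvDesc 0 = [0] from rfl]; simp [hg]
          rw [hfm, show 5 - out.length = (4 - out.length) + 1 from by omega,
              List.take_succ_cons, List.take_nil]
  | succ j ih =>
      intro out hout
      by_cases h5 : 5 ≤ out.length
      · simp only [pvAltGo]
        rw [if_pos h5, show 5 - out.length = 0 from by omega, List.take_zero, List.append_nil]
      · simp only [pvAltGo]
        rw [if_neg h5]
        by_cases hc : types.getD (j+1) "" = types.getD (j+1+1) "" ∧ types.getD (j+1+1) "" = types.getD (j+1+2) ""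
        · rw [if_pos hc]
          have hg : pvG types (j+1) = none := by unfold pvG; rw [if_pos hc]
          have hfm : List.filterMap (pvG types) (pvDesc (j+1)) =
              List.filterMap (pvG types) (pvDesc j) := by
            rw [show pvDesc (j+1) = (j+1) :: pvDesc j from rfl]; simp [hg]
          rw [ih out hout, hfm]
        · rw [if_neg hc]
          have hg : pvG types (j+1) =
              some [types.getD (j+1) "", types.getD (j+1+1) "", types.getD (j+1+2) ""] := by
            unfold pvG; rw [if_neg hc]
          have hlen : (out ++ [[types.getD (j+1) "", types.getD (j+1+1) "", types.getD (j+1+2) ""]]).length ≤ 5 := by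
            simp; omega
          rw [ih _ hlen]
          have hfm : List.filterMap (pvG types) (pvDesc (j+1)) =
              [types.getD (j+1) "", types.getD (j+1+1) "", types.getD (j+1+2) ""] ::
                List.filterMap (pvG types) (pvDesc j) := by
            rw [show pvDesc (j+1) = (j+1) :: pvDesc j from rfl]; simp [hg]
          rw [hfm]
          have h2 : (out ++ [[types.getD (j+1) "", types.getD (j+1+1) "", types.getD (j+1+2) ""]]).length
              = out.length + 1 := by simp
          rw [h2, show 5 - out.length = (5 - (out.length + 1)) + 1 from by omega,
              List.take_succ_cons, List.append_assoc, List.singleton_append]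

lemma pvLastN (l : List (List String)) : (l.reverse.take 5).reverse = l.drop (l.length - 5) := by
  by_cases h : l.length ≤ 5
  · have h0 : l.length - 5 = 0 := by omega
    rw [h0, List.drop_zero, List.take_of_length_le (by simpa using h), List.reverse_reverse]
  · have h5 : l.length - (l.length - 5) = 5 := by omega
    have hrd := List.reverse_drop (l := l) (i := l.length - 5)
    rw [h5] at hrd
    rw [← hrd, List.reverse_reverse]

-- ===== VERDICT (by name: the statement is the Claim_ definition above) =====
theorem extract_action_sequences_py_spec : Claim_equal_extract_action_sequences_py := by
  intro actions _
  unfold Spec_extract_action_sequences_py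
  rw [pvA_shape]
  set types := actions.map (fun a => PySem.Dict.getD (PySem.Dict.mk a) "type" "") with htypes
  show (pvW types).drop ((pvW types).length - 5) = extract_action_sequences_py_alt actions
  unfold extract_action_sequences_py_alt
  rw [← htypes]
  by_cases h3 : types.length < 3
  · have h0 : types.length - 2 = 0 := by omega
    simp [h3, pvW, h0]
  · simp only [h3, if_false]
    rw [pvAltGo_spec types (types.length - 3) [] (by simp)]
    have hlen32 : types.length - 3 + 1 = types.length - 2 := by omega
    have hdesc : pvDesc (types.length - 3) = (List.range (types.length - 2)).reverse := by
      rw [pvDesc_eq, hlen32]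
    rw [List.nil_append, hdesc, List.filterMap_reverse]
    rw [show (List.range (types.length - 2)).filterMap (pvG types) = pvW types from rfl]
    exact (pvLastN (pvW types)).symm
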